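-- pv_equiv track=rewrite | github.com/Anac0n6a/homework | play.py | typing_trainer
-- ===== SOURCE A (Python) =====
-- PLAYERS = 2
--
-- def typing_trainer(k, digits) -> int:
--     dicts = {}
--     for num in digits:
--         dicts[num] = dicts.get(num, 0) + 1
--     result = 0
--     for num in dicts.values():
--         if num <= k * PLAYERS:
--             result += 1
--     return result
-- ===== SOURCE B (Python) =====
-- PLAYERS = 2
--
-- def typing_trainer(k, digits) -> int:
--     limit = k * PLAYERS
--     s = sorted(digits)
--     if not s:
--         return 0
--     result = 0
--     run = 1
--     prev = s[0]
--     for x in s[1:]: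
--         if x == prev:
--             run += 1
--         else:
--             if run <= limit:
--                 result += 1
--             run = 1
--         prev = x
--     if run <= limit:
--         result += 1
--     return result
-- ===== Notes on version B (the rewrite author's own statement) =====
-- stated objective: alternative
-- what changed: Replaces the frequency dictionary plus value-scanning loop by sort-then-scan: sort the digits and walk the sorted list once, grouping consecutive equal elements into runs and counting the runs whose length is at most k*PLAYERS.
import Mathlib
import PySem

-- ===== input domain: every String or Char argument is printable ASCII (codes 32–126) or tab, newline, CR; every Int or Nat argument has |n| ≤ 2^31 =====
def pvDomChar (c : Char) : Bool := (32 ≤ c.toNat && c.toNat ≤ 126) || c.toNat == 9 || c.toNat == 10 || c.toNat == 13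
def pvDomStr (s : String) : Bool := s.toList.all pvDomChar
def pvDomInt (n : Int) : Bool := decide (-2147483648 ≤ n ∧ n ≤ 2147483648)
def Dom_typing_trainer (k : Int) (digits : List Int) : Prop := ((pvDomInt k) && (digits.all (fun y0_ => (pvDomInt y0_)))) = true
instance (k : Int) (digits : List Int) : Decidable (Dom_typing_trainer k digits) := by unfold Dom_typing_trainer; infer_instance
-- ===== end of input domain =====

-- B replaces A's frequency dictionary + value-scan by sort-then-scan over runs (return value only; no mutation).
-- ===== PORT A =====
def PLAYERS : Int := 2

def typing_trainer (k : Int) (digits : List Int) : Int :=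
  let dicts : PySem.Dict Int Int :=
    digits.foldl (fun d num => d.insert num (d.getD num 0 + 1)) PySem.Dict.empty
  dicts.values.foldl (fun result num => if num <= k * PLAYERS then result + 1 else result) 0

-- ===== PORT B =====
-- the for-loop of Source B over the tail of the sorted list, state (prev, run, result)
def scanRuns (limit prev run result : Int) : List Int → Int
  | [] => if run ≤ limit then result + 1 else result
  | x :: xs =>
    if x == prev then scanRuns limit x (run + 1) result xs
    else scanRuns limit x 1 (if run ≤ limit then result + 1 else result) xs

def typing_trainer_alt (k : Int) (digits : List Int) : Int :=
  let limit := k * PLAYERS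
  match PySem.List.sorted digits (fun x => x) false with
  | [] => 0
  | v :: rest => scanRuns limit v 1 0 rest

-- ===== PRECONDITION & SPEC =====
def Spec_typing_trainer (k : Int) (digits : List Int) (out : Int) : Prop := out = typing_trainer_alt k digits
instance (k : Int) (digits : List Int) (out : Int) : Decidable (Spec_typing_trainer k digits out) := by unfold Spec_typing_trainer; infer_instance

-- ===== CLAIM (what is proved, stated in full; the proofs are below) =====
def Claim_equal_typing_trainer : Prop := ∀ (k : Int) (digits : List Int), Dom_typing_trainer k digits → Spec_typing_trainer k digits (typing_trainer k digits)

-- ===== LEMMAS AND PROOFS =====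

-- countP agrees on two duplicate-free lists with the same members
theorem countP_eq_of_nodup_mem (p : Int → Bool) (s t : List Int)
    (hs : s.Nodup) (ht : t.Nodup) (h : ∀ x, x ∈ s ↔ x ∈ t) :
    s.countP p = t.countP p :=
  List.Perm.countP_eq p ((List.perm_ext_iff_of_nodup hs ht).mpr h)

-- splitting the first distinct value off the "distinct values with small count" count
theorem split_head (limit x : Int) (xs : List Int) :
    ((PySem.Set.ofList (x :: xs)).countP
        (fun y => decide (((x :: xs).count y : Int) ≤ limit)) : Int)
      = (if (1 + (xs.count x : Int)) ≤ limit then 1 else 0)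
        + ((PySem.Set.ofList (xs.filter (fun y => y != x))).countP
            (fun y => decide ((xs.count y : Int) ≤ limit)) : Int) := by
  have hnod : (x :: PySem.Set.ofList (xs.filter (fun y => y != x))).Nodup := by
    refine List.nodup_cons.mpr ⟨?_, PySem.Set.nodup_ofList _⟩
    simp [PySem.Set.mem_ofList, List.mem_filter]
  have hperm : (PySem.Set.ofList (x :: xs)).Perm
      (x :: PySem.Set.ofList (xs.filter (fun y => y != x))) := by
    refine (List.perm_ext_iff_of_nodup (PySem.Set.nodup_ofList _) hnod).mpr ?_
    intro y
    by_cases hy : y = x <;>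
      simp [PySem.Set.mem_ofList, List.mem_filter, hy]
  rw [List.Perm.countP_eq _ hperm, List.countP_cons]
  have htail : (PySem.Set.ofList (xs.filter (fun y => y != x))).countP
      (fun y => decide (((x :: xs).count y : Int) ≤ limit))
      = (PySem.Set.ofList (xs.filter (fun y => y != x))).countP
      (fun y => decide ((xs.count y : Int) ≤ limit)) := by
    refine List.countP_congr ?_
    intro y hy
    have hyne : y ≠ x := by
      have := (PySem.Set.mem_ofList _ _).mp hy
      simp [List.mem_filter] at this
      exact this.2
    simp [Ne.symm hyne]  -- y ≠ x: head contributes 0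
  rw [htail, List.count_cons_self]
  by_cases h : 1 + (xs.count x : Int) ≤ limit <;> simp [h] <;> omega

-- the run-scan on a sorted tail computes the distinct-value count
theorem scan_spec (limit : Int) (l : List Int) :
    ∀ (v run result : Int), (v :: l).Pairwise (· ≤ ·) →
      scanRuns limit v run result l
        = result + (if run + (l.count v : Int) ≤ limit then 1 else 0)
          + ((PySem.Set.ofList (l.filter (fun y => y != v))).countP
              (fun y => decide ((l.count y : Int) ≤ limit)) : Int) := by
  induction l with
  | nil =>
    intro v run result _
    simp [scanRuns]
    split_ifs <;> omega
  | cons x xs ih =>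
    intro v run result hpair
    rcases List.pairwise_cons.mp hpair with ⟨hv, htail⟩
    by_cases hx : x = v
    · subst hx
      have h1 : scanRuns limit x run result (x :: xs) = scanRuns limit x (run + 1) result xs := by
        simp [scanRuns]
      rw [h1, ih x (run + 1) result htail]
      have hfil : (x :: xs).filter (fun y => y != x) = xs.filter (fun y => y != x) := by
        simp
      have hcnt : ((x :: xs).count x : Int) = (xs.count x : Int) + 1 := by
        rw [List.count_cons_self]; push_cast; ring
      have htailP : (PySem.Set.ofList (xs.filter (fun y => y != x))).countP
          (fun y => decide (((x :: xs).count y : Int) ≤ limit))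
          = (PySem.Set.ofList (xs.filter (fun y => y != x))).countP
          (fun y => decide ((xs.count y : Int) ≤ limit)) := by
        refine List.countP_congr ?_
        intro y hy
        have hyne : y ≠ x := by
          have := (PySem.Set.mem_ofList _ _).mp hy
          simp [List.mem_filter] at this
          exact this.2
        simp [Ne.symm hyne]
      rw [hfil, htailP, hcnt]
      generalize ((List.countP (fun y => decide ((xs.count y : Int) ≤ limit))
          (PySem.Set.ofList (xs.filter (fun y => y != x))) : Nat) : Int) = C
      split_ifs <;> omega
    · -- new run: x > v, so v never reappears
      have hvx : v ≤ x := hv x (by simp)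
      have hvlt : v < x := lt_of_le_of_ne hvx (Ne.symm hx)
      have hxle : ∀ y ∈ xs, x ≤ y := (List.pairwise_cons.mp htail).1
      have hvnot : v ∉ (x :: xs) := by
        intro hmem
        rcases List.mem_cons.mp hmem with h | h
        · exact hx h.symm
        · exact absurd (hxle v h) (not_le.mpr hvlt)
      have h1 : scanRuns limit v run result (x :: xs)
          = scanRuns limit x 1 (if run ≤ limit then result + 1 else result) xs := by
        simp [scanRuns, hx]
      rw [h1, ih x 1 _ htail]
      have hcnt0 : (x :: xs).count v = 0 := List.count_eq_zero.mpr hvnot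
      have hfil : (x :: xs).filter (fun y => y != v) = x :: xs := by
        refine List.filter_eq_self.mpr ?_
        intro y hy
        rcases List.mem_cons.mp hy with h | h
        · simp [h, hx]
        · have : v < y := lt_of_lt_of_le hvlt (hxle y h)
          simp [ne_of_gt this]
      rw [hcnt0, hfil, split_head limit x xs]
      generalize ((List.countP (fun y => decide ((xs.count y : Int) ≤ limit))
          (PySem.Set.ofList (xs.filter (fun y => y != x))) : Nat) : Int) = C
      split_ifs <;> omega

-- ===== VERDICT (by name: the statement is the Claim_ definition above) =====
theorem typing_trainer_spec : Claim_equal_typing_trainer := by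
  intro k digits _
  unfold Spec_typing_trainer typing_trainer typing_trainer_alt
  rw [PySem.Dict.foldl_insert_getD_add_one_eq_counter]
  simp only [PySem.Dict.values, PySem.Dict.items_counter, List.map_map,
    PySem.List.foldl_ite_add_one]
  simp only [List.countP_map, Function.comp_def, zero_add]
  have hperm : (PySem.List.sorted digits (fun x => x) false).Perm digits :=
    PySem.List.sorted_perm digits (fun x => x) false
  have hcnt : ∀ y : Int, digits.count y = (PySem.List.sorted digits (fun x => x) false).count y :=
    fun y => (hperm.count_eq y).symm
  have hset : (PySem.Set.ofList digits).countP
        (fun y => decide (((PySem.List.sorted digits (fun x => x) false).count y : Int) ≤ k * PLAYERS))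
      = (PySem.Set.ofList (PySem.List.sorted digits (fun x => x) false)).countP
        (fun y => decide (((PySem.List.sorted digits (fun x => x) false).count y : Int) ≤ k * PLAYERS)) := by
    refine countP_eq_of_nodup_mem _ _ _ (PySem.Set.nodup_ofList _) (PySem.Set.nodup_ofList _) ?_
    intro y
    simp [PySem.Set.mem_ofList, hperm.mem_iff]
  have hpair : (PySem.List.sorted digits (fun x => x) false).Pairwise (· ≤ ·) :=
    PySem.List.sorted_pairwise digits (fun x => x)
  have hmain : ((PySem.Set.ofList digits).countP
        (fun y => decide ((digits.count y : Int) ≤ k * PLAYERS)) : Int)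
      = match PySem.List.sorted digits (fun x => x) false with
        | [] => 0
        | v :: rest => scanRuns (k * PLAYERS) v 1 0 rest := by
    have hpred : (fun y => decide ((digits.count y : Int) ≤ k * PLAYERS))
        = (fun y => decide (((PySem.List.sorted digits (fun x => x) false).count y : Int) ≤ k * PLAYERS)) := by
      funext y; rw [hcnt y]
    rw [hpred, hset]
    rcases hsort : PySem.List.sorted digits (fun x => x) false with _ | ⟨v, rest⟩
    · simp
    · rw [hsort] at hpair
      change _ = scanRuns (k * PLAYERS) v 1 0 rest
      rw [scan_spec (k * PLAYERS) rest v 1 0 hpair, split_head (k * PLAYERS) v rest]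
      have hcv : (v :: rest).count v = rest.count v + 1 := List.count_cons_self
      have htailP : (PySem.Set.ofList (rest.filter (fun y => y != v))).countP
          (fun y => decide (((v :: rest).count y : Int) ≤ k * PLAYERS))
          = (PySem.Set.ofList (rest.filter (fun y => y != v))).countP
          (fun y => decide ((rest.count y : Int) ≤ k * PLAYERS)) := by
        refine List.countP_congr ?_
        intro y hy
        have hyne : y ≠ v := by
          have := (PySem.Set.mem_ofList _ _).mp hy
          simp [List.mem_filter] at this
          exact this.2
        simp [Ne.symm hyne]
      generalize ((List.countP (fun y => decide ((rest.count y : Int) ≤ k * PLAYERS))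
          (PySem.Set.ofList (rest.filter (fun y => y != v))) : Nat) : Int) = C
      split_ifs <;> omega
  exact hmain
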